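-- pv_equiv track=rewrite | github.com/irredux/atlas | arachne.py | simple_html
-- ===== SOURCE A (Python) =====
-- def simple_html(i_txt):
--     allowed_dict = {"&lt;br /&gt;": "<br />",
--             "&lt;sup&gt;": "<sup>", "&lt;/sup&gt;": "</sup>",
--             "&lt;sub&gt;": "<sub>", "&lt;/sub&gt;": "</sub>",
--             "&lt;i&gt;": "<i>", "&lt;/i&gt;": "</i>",
--             "&lt;b&gt;": "<b>", "&lt;/b&gt;": "</b>",
--             "&lt;aut&gt;": "<aut>", "&lt;/aut&gt;": "</aut>",
--             "&lt;rot&gt;": "<rot>", "&lt;/rot&gt;": "</rot>",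
--             "&lt;blau&gt;": "<blau>", "&lt;/blau&gt;": "</blau>",
--             "&lt;gruen&gt;": "<gruen>", "&lt;/gruen&gt;": "</gruen>",
--             "&lt;gelb&gt;": "<gelb>", "&lt;/gelb&gt;": "</gelb>",
--             }
--     for key, val in allowed_dict.items():
--         i_txt = i_txt.replace(key, val)
--     return i_txt
-- ===== SOURCE B (Python) =====
-- def simple_html(i_txt):
--     # Build the key/value table from the tag-name list instead of writing it out,
--     # then do ONE left-to-right scan substituting the first matching escaped token.
--     names = ["sup", "sub", "i", "b", "aut", "rot", "blau", "gruen", "gelb"]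
--     pairs = [("&lt;br /&gt;", "<br />")]
--     for nm in names:
--         pairs.append(("&lt;" + nm + "&gt;", "<" + nm + ">"))
--         pairs.append(("&lt;/" + nm + "&gt;", "</" + nm + ">"))
--     out = []
--     i = 0
--     n = len(i_txt)
--     while i < n:
--         for key, val in pairs:
--             if i_txt.startswith(key, i):
--                 out.append(val)
--                 i += len(key)
--                 break
--         else:
--             out.append(i_txt[i])
--             i += 1
--     return "".join(out)
-- ===== Notes on version B (the rewrite author's own statement) =====
-- stated objective: alternative
-- what changed: Replaces the 19 sequential full-string replace() passes over a written-out dict with a table generated from the tag-name list plus a single left-to-right scan that at each position emits the mapped tag for the first matching escaped token and otherwise copies the character.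
import Mathlib
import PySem

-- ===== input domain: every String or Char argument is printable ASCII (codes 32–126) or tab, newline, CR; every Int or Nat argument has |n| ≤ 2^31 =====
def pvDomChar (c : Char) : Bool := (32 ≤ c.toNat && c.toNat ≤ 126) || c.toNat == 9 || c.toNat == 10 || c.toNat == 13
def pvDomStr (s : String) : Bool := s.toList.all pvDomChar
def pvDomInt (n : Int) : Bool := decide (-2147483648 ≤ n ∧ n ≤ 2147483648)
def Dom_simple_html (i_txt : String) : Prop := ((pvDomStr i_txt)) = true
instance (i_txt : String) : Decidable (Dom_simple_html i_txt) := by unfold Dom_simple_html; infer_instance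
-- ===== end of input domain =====

-- B replaces A's 19 sequential str.replace passes (over a written-out dict) by ONE
-- left-to-right scan over a table generated from the tag-name list (objective: alternative).

-- ===== PORT A =====
-- the literal dict from A's source: dict[str,str] -> association list in insertion order
def pvHtmlTable : List (String × String) :=
  [("&lt;br /&gt;", "<br />"),
   ("&lt;sup&gt;", "<sup>"), ("&lt;/sup&gt;", "</sup>"),
   ("&lt;sub&gt;", "<sub>"), ("&lt;/sub&gt;", "</sub>"),
   ("&lt;i&gt;", "<i>"), ("&lt;/i&gt;", "</i>"),
   ("&lt;b&gt;", "<b>"), ("&lt;/b&gt;", "</b>"),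
   ("&lt;aut&gt;", "<aut>"), ("&lt;/aut&gt;", "</aut>"),
   ("&lt;rot&gt;", "<rot>"), ("&lt;/rot&gt;", "</rot>"),
   ("&lt;blau&gt;", "<blau>"), ("&lt;/blau&gt;", "</blau>"),
   ("&lt;gruen&gt;", "<gruen>"), ("&lt;/gruen&gt;", "</gruen>"),
   ("&lt;gelb&gt;", "<gelb>"), ("&lt;/gelb&gt;", "</gelb>")]

-- for key, val in allowed_dict.items(): i_txt = i_txt.replace(key, val)
def simple_html (i_txt : String) : String :=
  pvHtmlTable.foldl (fun acc kv => PySem.Str.replace acc kv.1 kv.2) i_txt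

-- ===== PORT B =====
-- Source B builds its pairs table from the tag-name list ('names' / the 'pairs' loop);
-- ported over List Char (PySem strings are defined over List Char): '+' on str is ++.
def pvNames : List (List Char) :=
  ["sup".toList, "sub".toList, "i".toList, "b".toList, "aut".toList,
   "rot".toList, "blau".toList, "gruen".toList, "gelb".toList]

def pvPairs : List (List Char × List Char) :=
  ("&lt;br /&gt;".toList, "<br />".toList) ::
    pvNames.flatMap (fun nm =>
      [("&lt;".toList ++ nm ++ "&gt;".toList, "<".toList ++ nm ++ ">".toList),
       ("&lt;/".toList ++ nm ++ "&gt;".toList, "</".toList ++ nm ++ ">".toList)])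

-- Source B's while-loop: at position i it emits val for the first (key, val) with
-- i_txt.startswith(key, i) (advancing by len(key)), else copies the character.
-- 'i += len(key)' is the drop of (key.length - 1) from the tail t of c :: t —
-- exact since every key is nonempty.
def pvScan (tab : List (List Char × List Char)) : List Char → List Char
  | [] => []
  | c :: t =>
    match tab.find? (fun e => e.1.isPrefixOf (c :: t)) with
    | some e => e.2 ++ pvScan tab (t.drop (e.1.length - 1))
    | none => c :: pvScan tab t
termination_by l => l.length
decreasing_by
  · simp only [List.length_drop, List.length_cons]; omega
  · simp

def simple_html_alt (i_txt : String) : String :=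
  String.ofList (pvScan pvPairs i_txt.toList)

-- ===== PRECONDITION & SPEC =====
def Spec_simple_html (i_txt : String) (out : String) : Prop := out = simple_html_alt i_txt
instance (i_txt : String) (out : String) : Decidable (Spec_simple_html i_txt out) := by unfold Spec_simple_html; infer_instance

-- ===== CLAIM (what is proved, stated in full; the proofs are below) =====
def Claim_equal_simple_html : Prop := ∀ (i_txt : String), Dom_simple_html i_txt → Spec_simple_html i_txt (simple_html i_txt)

-- ===== LEMMAS AND PROOFS =====

-- B's generated pairs table lists exactly A's dict entries, in A's insertion order
theorem pvPairs_eq_table :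
    pvPairs = pvHtmlTable.map (fun kv => (kv.1.toList, kv.2.toList)) := by decide

-- 'a and b disagree at some common index' — then b can never be a prefix of a ++ anything
def pvClash (a b : List Char) : Bool := (a.zip b).any (fun q => q.1 != q.2)

theorem pvClash_not_prefix {a b : List Char} (h : pvClash a b = true) (r : List Char) :
    ¬ b.isPrefixOf (a ++ r) = true := by
  induction a generalizing b r with
  | nil => simp [pvClash] at h
  | cons x a' ih =>
    cases b with
    | nil => simp [pvClash] at h
    | cons y b' =>
      simp only [pvClash, List.zip_cons_cons, List.any_cons, Bool.or_eq_true, bne_iff_ne] at h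
      simp only [List.cons_append, List.isPrefixOf, Bool.and_eq_true, beq_iff_eq]
      rcases h with h | h
      · intro hc; exact h hc.1.symm
      · intro hc; exact ih (h := h) r hc.2

-- the combinatorial facts about the table that make "sequential replaces = one scan" true
def pvGood (tab : List (List Char × List Char)) : Prop :=
  (∀ e ∈ tab, e.1 ≠ [] ∧ e.1.head? = some '&' ∧ '<' ∉ e.1 ∧ e.2.head? = some '<' ∧ '&' ∉ e.2) ∧
  (∀ e ∈ tab, ∀ e' ∈ tab, ∀ p < e.1.length, 0 < p → pvClash (e.1.drop p) e'.1 = true)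

theorem pvGood_mono {S : List (List Char × List Char)} {e} (h : pvGood (S ++ [e])) : pvGood S := by
  obtain ⟨h1, h2⟩ := h
  exact ⟨fun x hx => h1 x (by simp [hx]), fun x hx y hy => h2 x (by simp [hx]) y (by simp [hy])⟩

-- ---- equations of PySem.Chars.replace.go and the derived recursion of Chars.replace ----

theorem pvGo_zero (old new l acc : List Char) :
    PySem.Chars.replace.go old new 0 l acc = acc.reverse ++ l := rfl

theorem pvGo_nil (old new : List Char) (f : Nat) (acc : List Char) :
    PySem.Chars.replace.go old new (f+1) [] acc = acc.reverse := rfl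

theorem pvGo_cons (old new : List Char) (f : Nat) (c : Char) (t acc : List Char) :
    PySem.Chars.replace.go old new (f+1) (c::t) acc =
      (if old.isPrefixOf (c::t) then
        PySem.Chars.replace.go old new f (List.drop old.length (c::t)) (new.reverse ++ acc)
      else PySem.Chars.replace.go old new f t (c :: acc)) := rfl

theorem pvGo_acc (old new : List Char) :
    ∀ (f : Nat) (l acc : List Char),
      PySem.Chars.replace.go old new f l acc = acc.reverse ++ PySem.Chars.replace.go old new f l [] := by
  intro f
  induction f with
  | zero => intro l acc; simp [pvGo_zero]
  | succ f ih =>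
    intro l acc
    cases l with
    | nil => simp [pvGo_nil]
    | cons c t =>
      rw [pvGo_cons, pvGo_cons]
      split
      · rw [ih _ (new.reverse ++ acc), ih _ (new.reverse ++ [])]; simp
      · rw [ih _ (c :: acc), ih _ (c :: [])]; simp

theorem pvGo_fuel (old new : List Char) (hold : old ≠ []) :
    ∀ (f f' : Nat) (l : List Char), l.length ≤ f → l.length ≤ f' →
      PySem.Chars.replace.go old new f l [] = PySem.Chars.replace.go old new f' l [] := by
  intro f
  induction f with
  | zero =>
    intro f' l hf _
    have : l = [] := List.eq_nil_of_length_eq_zero (Nat.le_zero.mp hf)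
    subst this
    cases f' <;> simp [pvGo_zero, pvGo_nil]
  | succ f ih =>
    intro f' l hf hf'
    cases l with
    | nil => cases f' <;> simp [pvGo_zero, pvGo_nil]
    | cons c t =>
      cases f' with
      | zero => simp at hf'
      | succ f'' =>
        rw [pvGo_cons, pvGo_cons]
        have hlen : t.length ≤ f := by simpa using hf
        have hlen' : t.length ≤ f'' := by simpa using hf'
        split
        · next hpre =>
          have hdrop : (List.drop old.length (c::t)).length ≤ t.length := by
            have : 1 ≤ old.length := by
              cases old with | nil => exact absurd rfl hold | cons _ _ => simp
            simp only [List.length_drop, List.length_cons]; omega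
          rw [pvGo_acc _ _ _ _ (new.reverse ++ []), pvGo_acc _ _ f'' _ (new.reverse ++ [])]
          rw [ih f'' _ (le_trans hdrop hlen) (le_trans hdrop hlen')]
        · rw [pvGo_acc _ _ _ _ [c], pvGo_acc _ _ f'' _ [c]]
          rw [ih f'' _ hlen hlen']

theorem pvRepl_nil (old new : List Char) (hold : old ≠ []) :
    PySem.Chars.replace [] old new = [] := by
  rw [PySem.Chars.replace]
  simp [List.isEmpty_iff, hold, pvGo_zero]

theorem pvRepl_cons_pos {old : List Char} (new : List Char) (hold : old ≠ [])
    {c : Char} {t : List Char} (h : old.isPrefixOf (c::t) = true) :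
    PySem.Chars.replace (c::t) old new =
      new ++ PySem.Chars.replace (List.drop old.length (c::t)) old new := by
  rw [PySem.Chars.replace, PySem.Chars.replace]
  simp only [List.isEmpty_iff, hold, if_false]
  rw [List.length_cons, pvGo_cons, if_pos h, pvGo_acc]
  have h1 : 1 ≤ old.length := by
    cases old with | nil => exact absurd rfl hold | cons _ _ => simp
  have hdl : (List.drop old.length (c::t)).length ≤ t.length := by
    simp only [List.length_drop, List.length_cons]; omega
  rw [pvGo_fuel old new hold t.length (List.drop old.length (c::t)).length _ hdl le_rfl]
  simp

theorem pvRepl_cons_neg {old : List Char} (new : List Char) (hold : old ≠ [])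
    {c : Char} {t : List Char} (h : ¬ old.isPrefixOf (c::t) = true) :
    PySem.Chars.replace (c::t) old new = c :: PySem.Chars.replace t old new := by
  rw [PySem.Chars.replace, PySem.Chars.replace]
  simp only [List.isEmpty_iff, hold, if_false]
  rw [List.length_cons, pvGo_cons, if_neg h, pvGo_acc]
  simp

-- replace copies a block a verbatim when no occurrence of old starts inside a
theorem pvRepl_copy {old : List Char} (new : List Char) (hold : old ≠ []) :
    ∀ (a Z : List Char), (∀ p < a.length, ¬ old.isPrefixOf (List.drop p (a ++ Z)) = true) →
      PySem.Chars.replace (a ++ Z) old new = a ++ PySem.Chars.replace Z old new := by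
  intro a
  induction a with
  | nil => intro Z _; simp
  | cons x a' ih =>
    intro Z hp
    have h0 : ¬ old.isPrefixOf (x :: (a' ++ Z)) = true := by
      have := hp 0 (by simp)
      simpa using this
    rw [List.cons_append, pvRepl_cons_neg new hold h0, ih Z ?_]
    · simp
    · intro p hlt
      have := hp (p+1) (by simpa using Nat.succ_lt_succ hlt)
      simpa using this

-- ---- equations of pvScan ----

theorem pvScan_nil (tab : List (List Char × List Char)) : pvScan tab [] = [] := by
  rw [pvScan]

theorem pvScan_cons_some {tab : List (List Char × List Char)} {c : Char} {t : List Char} {e}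
    (h : tab.find? (fun e => e.1.isPrefixOf (c :: t)) = some e) :
    pvScan tab (c :: t) = e.2 ++ pvScan tab (t.drop (e.1.length - 1)) := by
  rw [pvScan, h]

theorem pvScan_cons_none {tab : List (List Char × List Char)} {c : Char} {t : List Char}
    (h : tab.find? (fun e => e.1.isPrefixOf (c :: t)) = none) :
    pvScan tab (c :: t) = c :: pvScan tab t := by
  rw [pvScan, h]

theorem pvScan_empty_tab : ∀ s : List Char, pvScan [] s = s := by
  intro s
  induction s with
  | nil => exact pvScan_nil []
  | cons c t ih => rw [pvScan_cons_none (by simp), ih]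

-- the scan copies a block a verbatim when no key of the table matches inside a
theorem pvScan_copy {S : List (List Char × List Char)} :
    ∀ (a Z : List Char),
      (∀ p < a.length, ∀ x ∈ S, ¬ x.1.isPrefixOf (List.drop p (a ++ Z)) = true) →
      pvScan S (a ++ Z) = a ++ pvScan S Z := by
  intro a
  induction a with
  | nil => intro Z _; simp
  | cons y a' ih =>
    intro Z hp
    have hnone : S.find? (fun e => e.1.isPrefixOf (y :: (a' ++ Z))) = none := by
      rw [List.find?_eq_none]
      intro x hx
      have := hp 0 (by simp) x hx
      simpa using this
    rw [List.cons_append, pvScan_cons_none hnone, ih Z ?_]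
    · simp
    · intro p hlt x hx
      have := hp (p+1) (by simpa using Nat.succ_lt_succ hlt) x hx
      simpa using this

-- a key (no '<' in it) that does not match at the start of s cannot match at the start of
-- the scan of s: copied text is original text, and every substituted value begins with '<'
theorem pvScan_no_new_prefix {S : List (List Char × List Char)}
    (hv : ∀ e ∈ S, e.2.head? = some '<') :
    ∀ (n : Nat) (k s : List Char), s.length ≤ n → '<' ∉ k →
      ¬ k.isPrefixOf s = true → ¬ k.isPrefixOf (pvScan S s) = true := by
  intro n
  induction n with
  | zero =>
    intro k s hs _ hks
    have : s = [] := List.eq_nil_of_length_eq_zero (Nat.le_zero.mp hs)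
    subst this
    simpa [pvScan_nil] using hks
  | succ n ih =>
    intro k s hs hk hks
    cases s with
    | nil => simpa [pvScan_nil] using hks
    | cons c t =>
      cases k with
      | nil => simp at hks
      | cons a k' =>
        cases hf : S.find? (fun e => e.1.isPrefixOf (c :: t)) with
        | some x =>
          rw [pvScan_cons_some hf]
          have hx : x ∈ S := List.mem_of_find?_eq_some hf
          have hhead := hv x hx
          cases hval : x.2 with
          | nil => rw [hval] at hhead; simp at hhead
          | cons v0 v' =>
            rw [hval] at hhead
            simp only [List.head?_cons, Option.some.injEq] at hhead
            subst hhead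
            simp only [List.cons_append, List.isPrefixOf, Bool.and_eq_true, beq_iff_eq]
            rintro ⟨rfl, -⟩
            exact hk (by simp)
        | none =>
          rw [pvScan_cons_none hf]
          simp only [List.isPrefixOf, Bool.and_eq_true, beq_iff_eq] at hks ⊢
          rintro ⟨rfl, hpre⟩
          have hkt : ¬ k'.isPrefixOf t = true := fun h => hks ⟨rfl, h⟩
          exact ih k' t (by simpa using hs) (fun h => hk (by simp [h])) hkt hpre

-- MAIN LEMMA: one more replace pass over the scan of S = the scan of S ++ [e]
theorem pvMain {S : List (List Char × List Char)} {e : List Char × List Char}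
    (hG : pvGood (S ++ [e])) :
    ∀ (n : Nat) (s : List Char), s.length ≤ n →
      PySem.Chars.replace (pvScan S s) e.1 e.2 = pvScan (S ++ [e]) s := by
  have he : e ∈ S ++ [e] := by simp
  obtain ⟨hG1, hG2⟩ := hG
  obtain ⟨he1, he2, he3, he4, he5⟩ := hG1 e he
  have hvS : ∀ x ∈ S, x.2.head? = some '<' := fun x hx => (hG1 x (by simp [hx])).2.2.2.1
  -- no occurrence of e.1 can start inside a value v (values contain no '&', keys start '&')
  have hval_copy : ∀ (v Z : List Char), '&' ∉ v →
      ∀ p < v.length, ¬ e.1.isPrefixOf (List.drop p (v ++ Z)) = true := by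
    intro v Z hv p hp
    rw [List.drop_append_of_le_length (Nat.le_of_lt hp)]
    cases hdv : v.drop p with
    | nil => exact absurd (by simpa using congrArg List.length hdv) (by omega)
    | cons d0 d' =>
      cases hek : e.1 with
      | nil => exact absurd hek he1
      | cons a0 a' =>
        rw [hek] at he2
        simp only [List.head?_cons, Option.some.injEq] at he2
        subst he2
        simp only [List.cons_append, List.isPrefixOf, Bool.and_eq_true, beq_iff_eq]
        rintro ⟨h1, -⟩
        have hd0 : d0 ∈ v := List.mem_of_mem_drop (l := v) (by rw [hdv]; simp)
        exact hv (by rw [h1]; exact hd0)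
  intro n
  induction n with
  | zero =>
    intro s hs
    have : s = [] := List.eq_nil_of_length_eq_zero (Nat.le_zero.mp hs)
    subst this
    rw [pvScan_nil, pvScan_nil, pvRepl_nil _ _ he1]
  | succ n ih =>
    intro s hs
    cases s with
    | nil => rw [pvScan_nil, pvScan_nil, pvRepl_nil _ _ he1]
    | cons c t =>
      cases hf : S.find? (fun x => x.1.isPrefixOf (c :: t)) with
      | some k =>
        have hkS : k ∈ S := List.mem_of_find?_eq_some hf
        have hkpre : k.1.isPrefixOf (c :: t) = true := by
          simpa using List.find?_some hf
        obtain ⟨hk1, _, _, hk4, hk5⟩ := hG1 k (by simp [hkS])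
        obtain ⟨r, hr⟩ := (PySem.Chars.startswith_iff _ _).mp hkpre
        have hfap : (S ++ [e]).find? (fun x => x.1.isPrefixOf (c :: t)) = some k := by
          rw [List.find?_append, hf]; rfl
        have hdrop_eq : t.drop (k.1.length - 1) = r := by
          cases hk : k.1 with
          | nil => exact absurd hk hk1
          | cons k0 kt =>
            rw [hk] at hr
            cases hr
            simp
        have hrlen : r.length ≤ n := by
          have hlen := congrArg List.length hr
          have h1 : 0 < k.1.length := List.length_pos_iff.mpr hk1
          have hs' : t.length + 1 ≤ n + 1 := by simpa using hs
          simp only [List.length_cons, List.length_append] at hlen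
          omega
        rw [pvScan_cons_some hf, pvScan_cons_some hfap, hdrop_eq]
        rw [pvRepl_copy e.2 he1 k.2 _ (hval_copy k.2 _ hk5)]
        rw [ih r hrlen]
      | none =>
        have hnoS : ∀ x ∈ S, ¬ x.1.isPrefixOf (c :: t) = true := by
          intro x hx
          have := List.find?_eq_none.mp hf x hx
          simpa using this
        cases hep : e.1.isPrefixOf (c :: t) with
        | true =>
          obtain ⟨r, hr⟩ := (PySem.Chars.startswith_iff _ _).mp hep
          have hfap : (S ++ [e]).find? (fun x => x.1.isPrefixOf (c :: t)) = some e := by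
            rw [List.find?_append, hf, Option.none_or]
            simp [List.find?, hep]
          have hdrop_eq : t.drop (e.1.length - 1) = r := by
            cases hk : e.1 with
            | nil => exact absurd hk he1
            | cons k0 kt =>
              rw [hk] at hr
              cases hr
              simp
          have hrlen : r.length ≤ n := by
            have hlen := congrArg List.length hr
            have h1 : 0 < e.1.length := List.length_pos_iff.mpr he1
            have hs' : t.length + 1 ≤ n + 1 := by simpa using hs
            simp only [List.length_cons, List.length_append] at hlen
            omega
          -- the scan of S copies the e.1-block verbatim
          have hscopy : pvScan S (c :: t) = e.1 ++ pvScan S r := by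
            rw [← hr]
            refine pvScan_copy e.1 r ?_
            intro p hp x hx
            rcases Nat.eq_zero_or_pos p with rfl | hppos
            · rw [List.drop_zero, hr]; exact hnoS x hx
            · rw [List.drop_append_of_le_length (Nat.le_of_lt hp)]
              exact pvClash_not_prefix (hG2 e he x (by simp [hx]) p hp hppos) r
          rw [hscopy]
          cases hek : e.1 with
          | nil => exact absurd hek he1
          | cons a0 a' =>
            have hpre' : (a0 :: a').isPrefixOf (a0 :: (a' ++ pvScan S r)) = true := by
              rw [← List.cons_append]
              exact (PySem.Chars.startswith_iff _ _).mpr ⟨_, rfl⟩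
            rw [List.cons_append, pvRepl_cons_pos e.2 (by simp) hpre']
            have hdl : List.drop (a0 :: a').length (a0 :: (a' ++ pvScan S r)) = pvScan S r := by
              rw [← List.cons_append]; exact List.drop_left
            rw [hdl, ← hek, ih r hrlen, pvScan_cons_some hfap, hdrop_eq]
        | false =>
          have hfap : (S ++ [e]).find? (fun x => x.1.isPrefixOf (c :: t)) = none := by
            rw [List.find?_append, hf, Option.none_or]
            simp [List.find?, hep]
          rw [pvScan_cons_none hf, pvScan_cons_none hfap]
          have hnp : ¬ e.1.isPrefixOf (c :: pvScan S t) = true := by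
            have := pvScan_no_new_prefix hvS (n := t.length + 1) e.1 (c :: t)
              (by simp) he3 (by simp [hep])
            rwa [pvScan_cons_none hf] at this
          rw [pvRepl_cons_neg e.2 he1 hnp, ih t (by simpa using hs)]

-- iterating the passes over a good table = scanning with that table
theorem pvIter : ∀ (S : List (List Char × List Char)), pvGood S →
    ∀ s : List Char,
      S.foldl (fun acc e => PySem.Chars.replace acc e.1 e.2) s = pvScan S s := by
  intro S
  induction S using List.reverseRecOn with
  | nil => intro _ s; simp [pvScan_empty_tab]
  | append_singleton S e ih =>
    intro hG s
    rw [List.foldl_append]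
    simp only [List.foldl_cons, List.foldl_nil]
    rw [ih (pvGood_mono hG) s]
    exact pvMain hG s.length s le_rfl

-- string-level foldl of A = char-level foldl
theorem pvFoldl_toList : ∀ (L : List (String × String)) (s : String),
    L.foldl (fun acc kv => PySem.Str.replace acc kv.1 kv.2) s =
      String.ofList ((L.map (fun kv => (kv.1.toList, kv.2.toList))).foldl
        (fun acc e => PySem.Chars.replace acc e.1 e.2) s.toList) := by
  intro L
  induction L with
  | nil => intro s; simp [String.ofList_toList]
  | cons kv L ih =>
    intro s
    simp only [List.foldl_cons, List.map_cons]
    rw [ih (PySem.Str.replace s kv.1 kv.2)]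
    congr 1
    congr 1
    rw [PySem.Str.toList_replace]

theorem pvGood_table : pvGood (pvHtmlTable.map (fun kv => (kv.1.toList, kv.2.toList))) := by
  constructor
  · decide
  · decide

-- ===== VERDICT (by name: the statement is the Claim_ definition above) =====
theorem simple_html_spec : Claim_equal_simple_html := by
  intro i_txt _
  unfold Spec_simple_html simple_html simple_html_alt
  rw [pvFoldl_toList, pvIter _ pvGood_table i_txt.toList, pvPairs_eq_table]
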